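-- pv_equiv track=rewrite | github.com/GlassyFoozle/TrtDnnSplitting | src/integration/dnn_algorithm_runner.py | _mask_interval_groups
-- ===== SOURCE A (Python) =====
-- from typing import Dict, List, Optional, Tuple
--
-- def _mask_interval_groups(mask: List[int]) -> List[List[int]]:
--     """Return consecutive base-chunk index groups implied by a boundary mask."""
--     if not mask:
--         return [[0]]
--     groups: List[List[int]] = []
--     current: List[int] = [0]
--     for boundary_idx, bit in enumerate(mask):
--         if bit == 1:
--             groups.append(current)
--             current = [boundary_idx + 1]
--         else:
--             current.append(boundary_idx + 1)
--     groups.append(current)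
--     return groups
-- ===== SOURCE B (Python) =====
-- from typing import Dict, List, Optional, Tuple
--
-- def _mask_interval_groups(mask: List[int]) -> List[List[int]]:
--     """Return consecutive base-chunk index groups implied by a boundary mask."""
--     n = len(mask)
--     starts = [0] + [i + 1 for i, b in enumerate(mask) if b == 1]
--     ends = starts[1:] + [n + 1]
--     return [list(range(s, e)) for s, e in zip(starts, ends)]
-- ===== Notes on version B (the rewrite author's own statement) =====
-- stated objective: alternative
-- what changed: B derives all group start indices first (0 plus every i+1 where mask[i]==1), pairs each start with the next start (or n+1) as its end, and materializes each group as range(s, e), instead of A's running-accumulator loop that flushes the current group on each 1-bit.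
import Mathlib
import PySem

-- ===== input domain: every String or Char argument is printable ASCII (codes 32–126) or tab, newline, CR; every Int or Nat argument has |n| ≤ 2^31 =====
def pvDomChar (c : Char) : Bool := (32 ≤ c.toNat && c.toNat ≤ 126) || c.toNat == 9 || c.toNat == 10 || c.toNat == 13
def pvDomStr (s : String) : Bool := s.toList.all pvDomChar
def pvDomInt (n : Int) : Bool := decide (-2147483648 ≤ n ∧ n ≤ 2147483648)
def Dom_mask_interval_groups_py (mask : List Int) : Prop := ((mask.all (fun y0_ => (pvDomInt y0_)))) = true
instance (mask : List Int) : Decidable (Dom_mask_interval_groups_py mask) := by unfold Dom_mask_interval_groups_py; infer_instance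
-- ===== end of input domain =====

-- B derives all group boundaries first and materializes each group as a range,
-- instead of A's running-accumulator loop; alternative decomposition, same cost.

-- ===== PORT A =====
-- A's loop body: on bit == 1 flush `current` and start a fresh group, else extend `current`.
def aStep (s : List (List Int) × List Int) (p : Int × Int) : List (List Int) × List Int :=
  if p.2 = 1 then (s.1 ++ [s.2], [p.1 + 1]) else (s.1, s.2 ++ [p.1 + 1])

def mask_interval_groups_py (mask : List Int) : List (List Int) :=
  if mask = [] then [[0]]
  else
    let st := (PySem.List.enumerate mask 0).foldl aStep ([], [0])
    st.1 ++ [st.2]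

-- ===== PORT B =====
def mask_interval_groups_py_alt (mask : List Int) : List (List Int) :=
  let n : Int := mask.length
  let starts : List Int :=
    0 :: (PySem.List.enumerate mask 0).filterMap
      (fun p => if p.2 = 1 then some (p.1 + 1) else none)
  let ends : List Int := starts.drop 1 ++ [n + 1]
  (starts.zip ends).map (fun p => PySem.List.pyRange p.1 p.2 1)

-- ===== PRECONDITION & SPEC =====
def Spec_mask_interval_groups_py (mask : List Int) (out : List (List Int)) : Prop := out = mask_interval_groups_py_alt mask
instance (mask : List Int) (out : List (List Int)) : Decidable (Spec_mask_interval_groups_py mask out) := by unfold Spec_mask_interval_groups_py; infer_instance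

-- ===== CLAIM (what is proved, stated in full; the proofs are below) =====
def Claim_equal_mask_interval_groups_py : Prop := ∀ (mask : List Int), Dom_mask_interval_groups_py mask → Spec_mask_interval_groups_py mask (mask_interval_groups_py mask)

-- ===== LEMMAS AND PROOFS =====

-- Reference recursion: current group `c`, next index `j`, remaining mask bits.
def refGroups (c : List Int) (j : Int) : List Int → List (List Int)
  | [] => [c]
  | b :: r => if b = 1 then c :: refGroups [j] (j + 1) r else refGroups (c ++ [j]) (j + 1) r

-- Group start indices contributed by the mask, positions counted from `j`.
def cutsFrom (j : Int) : List Int → List Int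
  | [] => []
  | b :: r => if b = 1 then j :: cutsFrom (j + 1) r else cutsFrom (j + 1) r

-- Consecutive starts paired up, last group ending at `e`.
def mkGroups : List Int → Int → List (List Int)
  | [], _ => []
  | [s], e => [PySem.List.pyRange s e 1]
  | s :: t :: r, e => PySem.List.pyRange s t 1 :: mkGroups (t :: r) e

theorem lemA (mask : List Int) : ∀ (i : Int) (g : List (List Int)) (c : List Int),
    (((PySem.List.enumerate mask i).foldl aStep (g, c)).1
      ++ [((PySem.List.enumerate mask i).foldl aStep (g, c)).2])
      = g ++ refGroups c (i + 1) mask := by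
  induction mask with
  | nil => intro i g c; simp [PySem.List.enumerate_nil, refGroups]
  | cons b r ih =>
      intro i g c
      rw [PySem.List.enumerate_cons]
      by_cases hb : b = 1 <;> simp [List.foldl_cons, aStep, hb, refGroups, ih]

theorem lemF (mask : List Int) : ∀ (i : Int),
    (PySem.List.enumerate mask i).filterMap
      (fun p => if p.2 = 1 then some (p.1 + 1) else none) = cutsFrom (i + 1) mask := by
  induction mask with
  | nil => intro i; simp [PySem.List.enumerate_nil, cutsFrom]
  | cons b r ih =>
      intro i
      rw [PySem.List.enumerate_cons]
      by_cases hb : b = 1 <;> simp [hb, cutsFrom, ih]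

theorem lemZip (t : List Int) : ∀ (s e : Int),
    ((s :: t).zip (t ++ [e])).map (fun p => PySem.List.pyRange p.1 p.2 1)
      = mkGroups (s :: t) e := by
  induction t with
  | nil => intro s e; simp [mkGroups]
  | cons x r ih => intro s e; simp [mkGroups, ih x e]

theorem lemMk (mask : List Int) : ∀ (s j : Int), s < j →
    mkGroups (s :: cutsFrom j mask) (j + mask.length)
      = refGroups (PySem.List.pyRange s j 1) j mask := by
  induction mask with
  | nil => intro s j _; simp [cutsFrom, mkGroups, refGroups]
  | cons b r ih =>
      intro s j hsj
      have hlen : (j : Int) + ((b :: r).length : Int) = (j + 1) + (r.length : Int) := by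
        simp [List.length_cons]; ring
      by_cases hb : b = 1
      · subst hb
        rw [hlen]
        simp only [cutsFrom, refGroups, if_pos, mkGroups]
        rw [ih j (j + 1) (by omega), PySem.List.pyRange_one_singleton]
      · rw [hlen]
        simp only [cutsFrom, refGroups, hb, ite_false]
        rw [ih s (j + 1) (by omega),
          ← PySem.List.pyRange_one_succ_right (a := s) (b := j) (by omega)]

theorem ab_eq (mask : List Int) :
    mask_interval_groups_py mask = mask_interval_groups_py_alt mask := by
  unfold mask_interval_groups_py mask_interval_groups_py_alt
  by_cases h : mask = []
  · subst h; decide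
  · rw [if_neg h]
    simp only [lemF mask 0, show (0:Int) + 1 = 1 by norm_num]
    have hz := lemZip (cutsFrom 1 mask) 0 ((mask.length : Int) + 1)
    simp only [List.drop_succ_cons, List.drop_zero] at *
    rw [hz]
    have hm := lemMk mask 0 1 (by omega)
    rw [show (mask.length : Int) + 1 = 1 + (mask.length : Int) by ring, hm]
    have hA := lemA mask 0 [] [0]
    simp only [List.nil_append] at hA
    rw [hA]
    rw [show PySem.List.pyRange 0 1 1 = [0] by decide]
    norm_num

-- ===== VERDICT (by name: the statement is the Claim_ definition above) =====
theorem mask_interval_groups_py_spec : Claim_equal_mask_interval_groups_py := by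
  intro mask _
  unfold Spec_mask_interval_groups_py
  exact ab_eq mask
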